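-- pv_equiv track=rewrite | github.com/dcarleton67/advent-of-code-2021 | Day 22/main.py | remove_overlap
-- ===== SOURCE A (Python) =====
-- def get_overlap(cube_a, cube_b):
--     ax, ay, az = cube_a
--     bx, by, bz = cube_b
--
--     x_range = (max(ax[0], bx[0]), min(ax[1], bx[1]))
--     if x_range[0] >= x_range[1]: return None
--
--     y_range = (max(ay[0], by[0]), min(ay[1], by[1]))
--     if y_range[0] >= y_range[1]: return None
--
--     z_range = (max(az[0], bz[0]), min(az[1], bz[1]))
--     if z_range[0] >= z_range[1]: return None
--
--     return (x_range, y_range, z_range)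
--
-- def split_cube(cube, overlap):
--     x, y, z = cube
--     overlap_x, overlap_y, overlap_z = overlap
--
--     cubes = []
--     # slice everything to the left of the overlap
--     if overlap_x[0] > x[0]: cubes.append(((x[0], overlap_x[0]), y, z))
--     # slice everything to the right of the overlap
--     if overlap_x[1] < x[1]: cubes.append(((overlap_x[1], x[1]), y, z))
--
--     # now we're only checking above/below/in front/behind
--     # so our x range becomes the x range of the overlap
--
--     # slice everything in front of the overlap
--     if overlap_y[0] > y[0]: cubes.append((overlap_x, (y[0], overlap_y[0]), z))
--     if overlap_y[1] < y[1]: cubes.append((overlap_x, (overlap_y[1], y[1]), z))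
--
--     # slice everything above/below
--     if overlap_z[0] > z[0]: cubes.append((overlap_x, overlap_y, (z[0], overlap_z[0])))
--     if overlap_z[1] < z[1]: cubes.append((overlap_x, overlap_y, (overlap_z[1], z[1])))
--
--     return cubes
--
-- def remove_overlap(cuboids, cube):
--     new_cuboids = []
--     for cuboid in cuboids:
--         overlap = get_overlap(cuboid, cube)
--         if overlap:
--             split_cubes = split_cube(cuboid, overlap)
--             for split in split_cubes: new_cuboids.append(split)
--         else: new_cuboids.append(cuboid)
--     return new_cuboids
-- ===== SOURCE B (Python) =====
-- def remove_overlap(cuboids, cube):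
--     # Structural recursion on the axes: the side slabs for the first axis,
--     # then the recursive pieces for the remaining axes, each prefixed with
--     # the first axis clamped to the clip range.  No overlap tuple is ever
--     # materialized and no mutable box is maintained.
--     def carve(box, clip):
--         if not box:
--             return []
--         (a0, a1), (b0, b1) = box[0], clip[0]
--         lo, hi = max(a0, b0), min(a1, b1)
--         rest = box[1:]
--         side = []
--         if lo > a0:
--             side.append(((a0, lo),) + tuple(rest))
--         if hi < a1:
--             side.append(((hi, a1),) + tuple(rest))
--         return side + [((lo, hi),) + p for p in carve(rest, clip[1:])]
--
--     result = []
--     for cuboid in cuboids: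
--         (ax, ay, az), (bx, by, bz) = cuboid, cube
--         if all(max(a0, b0) < min(a1, b1)
--                for (a0, a1), (b0, b1) in ((ax, bx), (ay, by), (az, bz))):
--             result.extend(carve([ax, ay, az], [bx, by, bz]))
--         else:
--             result.append(cuboid)
--     return result
-- ===== Notes on version B (the rewrite author's own statement) =====
-- stated objective: alternative
-- what changed: Replaces get_overlap/split_cube (overlap tuple computed up front, six unrolled conditional appends) by structural recursion over the axes: carve emits the two side slabs of the first axis and prefixes the first axis clamped to the clip onto the recursively carved tail, so no overlap value is materialized and no per-axis mutable state exists; the intersection test is a single zip/all pass.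
import Mathlib
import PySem

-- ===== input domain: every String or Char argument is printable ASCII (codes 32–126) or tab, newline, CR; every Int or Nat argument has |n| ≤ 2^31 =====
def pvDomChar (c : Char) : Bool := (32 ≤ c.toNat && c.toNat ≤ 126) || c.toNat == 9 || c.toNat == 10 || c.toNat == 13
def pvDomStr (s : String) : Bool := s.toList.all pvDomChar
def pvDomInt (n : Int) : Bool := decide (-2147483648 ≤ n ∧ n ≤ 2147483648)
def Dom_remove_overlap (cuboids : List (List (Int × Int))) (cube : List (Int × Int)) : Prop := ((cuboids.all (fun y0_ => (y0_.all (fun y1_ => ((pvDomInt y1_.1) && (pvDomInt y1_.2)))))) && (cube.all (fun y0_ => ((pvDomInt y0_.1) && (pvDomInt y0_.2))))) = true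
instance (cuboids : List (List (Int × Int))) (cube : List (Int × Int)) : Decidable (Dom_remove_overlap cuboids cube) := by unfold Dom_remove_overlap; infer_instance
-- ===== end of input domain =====

-- B replaces A's get_overlap/split_cube helper pair by structural recursion over the
-- axes: side slabs of the first axis, then the recursively carved tail prefixed with
-- the clamped first axis; no overlap value is materialized.

-- ===== PORT A =====
-- get_overlap(cube_a, cube_b): unpacks both into exactly three axis ranges (raises
-- otherwise, excluded by Pre_); returns none exactly where the Python returns None.
def get_overlap_A (ca cb : List (Int × Int)) : Option (List (Int × Int)) :=
  match ca, cb with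
  | [ax, ay, az], [bx, by_, bz] =>
    let x_range : Int × Int := (max ax.1 bx.1, min ax.2 bx.2)
    if x_range.1 ≥ x_range.2 then none else
    let y_range : Int × Int := (max ay.1 by_.1, min ay.2 by_.2)
    if y_range.1 ≥ y_range.2 then none else
    let z_range : Int × Int := (max az.1 bz.1, min az.2 bz.2)
    if z_range.1 ≥ z_range.2 then none else
    some [x_range, y_range, z_range]
  | _, _ => none

def split_cube_A (cube overlap : List (Int × Int)) : List (List (Int × Int)) :=
  match cube, overlap with
  | [x, y, z], [ox, oy, oz] =>
    let cubes : List (List (Int × Int)) := []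
    let cubes := if ox.1 > x.1 then cubes ++ [[(x.1, ox.1), y, z]] else cubes
    let cubes := if ox.2 < x.2 then cubes ++ [[(ox.2, x.2), y, z]] else cubes
    let cubes := if oy.1 > y.1 then cubes ++ [[ox, (y.1, oy.1), z]] else cubes
    let cubes := if oy.2 < y.2 then cubes ++ [[ox, (oy.2, y.2), z]] else cubes
    let cubes := if oz.1 > z.1 then cubes ++ [[ox, oy, (z.1, oz.1)]] else cubes
    let cubes := if oz.2 < z.2 then cubes ++ [[ox, oy, (oz.2, z.2)]] else cubes
    cubes
  | _, _ => []

def remove_overlap (cuboids : List (List (Int × Int))) (cube : List (Int × Int)) : List (List (Int × Int)) :=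
  cuboids.foldl (fun new_cuboids cuboid =>
    match get_overlap_A cuboid cube with
    | some overlap => (split_cube_A cuboid overlap).foldl (fun nc s => nc ++ [s]) new_cuboids
    | none => new_cuboids ++ [cuboid]) []

-- ===== PORT B =====
-- B's carve: structural recursion on the box's axis list.  The empty-clip/non-empty-box
-- case cannot arise for equal-length arguments (Pre_); Python would raise there, the
-- port returns [].
def carve_B : List (Int × Int) → List (Int × Int) → List (List (Int × Int))
  | [], _ => []
  | _ :: _, [] => []
  | (a0, a1) :: rest, (b0, b1) :: clipRest =>
    let lo := max a0 b0
    let hi := min a1 b1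
    let side : List (List (Int × Int)) :=
      (if lo > a0 then [(a0, lo) :: rest] else []) ++
      (if hi < a1 then [(hi, a1) :: rest] else [])
    side ++ (carve_B rest clipRest).map (fun p => (lo, hi) :: p)

-- the loop body: unpack both boxes into three axis ranges, test the overlap, carve.
-- Python raises on the unpacking in the fallback case; outside Pre_, value immaterial.
def step_B (cube : List (Int × Int)) (result : List (List (Int × Int))) (cuboid : List (Int × Int)) : List (List (Int × Int)) :=
  match cuboid, cube with
  | [ax, ay, az], [bx, by_, bz] =>
    if [(ax, bx), (ay, by_), (az, bz)].all
        (fun p => decide (max p.1.1 p.2.1 < min p.1.2 p.2.2))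
    then result ++ carve_B [ax, ay, az] [bx, by_, bz]
    else result ++ [cuboid]
  | _, _ => result ++ [cuboid]

def remove_overlap_alt (cuboids : List (List (Int × Int))) (cube : List (Int × Int)) : List (List (Int × Int)) :=
  cuboids.foldl (step_B cube) []

-- ===== PRECONDITION & SPEC =====
-- Pre_ excludes exactly the inputs where A raises: get_overlap unpacks each cuboid and
-- the cube into three axis ranges, so a non-empty cuboids list needs cube and every
-- cuboid of length 3.
def Pre_remove_overlap (cuboids : List (List (Int × Int))) (cube : List (Int × Int)) : Prop :=
  cuboids = [] ∨ (cube.length = 3 ∧ ∀ c ∈ cuboids, c.length = 3)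
instance (cuboids : List (List (Int × Int))) (cube : List (Int × Int)) : Decidable (Pre_remove_overlap cuboids cube) := by unfold Pre_remove_overlap; infer_instance

def pvWitness_remove_overlap : (List (List (Int × Int))) × (List (Int × Int)) :=
  ([[(0, 10), (0, 10), (0, 10)]], [(2, 5), (-3, 4), (1, 20)])

def Spec_remove_overlap (cuboids : List (List (Int × Int))) (cube : List (Int × Int)) (out : List (List (Int × Int))) : Prop := out = remove_overlap_alt cuboids cube
instance (cuboids : List (List (Int × Int))) (cube : List (Int × Int)) (out : List (List (Int × Int))) : Decidable (Spec_remove_overlap cuboids cube out) := by unfold Spec_remove_overlap; infer_instance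

-- ===== CLAIM (what is proved, stated in full; the proofs are below) =====
def Claim_equal_remove_overlap : Prop := ∀ (cuboids : List (List (Int × Int))) (cube : List (Int × Int)), Dom_remove_overlap cuboids cube → Pre_remove_overlap cuboids cube → Spec_remove_overlap cuboids cube (remove_overlap cuboids cube)

-- ===== LEMMAS AND PROOFS =====

set_option maxHeartbeats 2000000 in
lemma step_eq (cube cuboid : List (Int × Int)) (hcube : cube.length = 3)
    (hc : cuboid.length = 3) (acc : List (List (Int × Int))) :
    (match get_overlap_A cuboid cube with
      | some overlap => (split_cube_A cuboid overlap).foldl (fun nc s => nc ++ [s]) acc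
      | none => acc ++ [cuboid]) =
    step_B cube acc cuboid := by
  obtain ⟨a, b, c, rfl⟩ := List.length_eq_three.mp hc
  obtain ⟨d, e, f, rfl⟩ := List.length_eq_three.mp hcube
  obtain ⟨a0, a1⟩ := a; obtain ⟨b0, b1⟩ := b; obtain ⟨c0, c1⟩ := c
  obtain ⟨d0, d1⟩ := d; obtain ⟨e0, e1⟩ := e; obtain ⟨f0, f1⟩ := f
  simp only [step_B]
  by_cases h1 : max a0 d0 < min a1 d1 <;>
  by_cases h2 : max b0 e0 < min b1 e1 <;>
  by_cases h3 : max c0 f0 < min c1 f1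
  case pos =>
    -- all three axes overlap: both sides are acc ++ the same six-slab list
    have hA : get_overlap_A [(a0, a1), (b0, b1), (c0, c1)] [(d0, d1), (e0, e1), (f0, f1)] =
        some [(max a0 d0, min a1 d1), (max b0 e0, min b1 e1), (max c0 f0, min c1 f1)] := by
      simp only [get_overlap_A]
      rw [if_neg (by omega), if_neg (by omega), if_neg (by omega)]
    rw [hA]
    have hall : ([((a0, a1), (d0, d1)), ((b0, b1), (e0, e1)), ((c0, c1), (f0, f1))]).all
        (fun p => decide (max p.1.1 p.2.1 < min p.1.2 p.2.2)) = true := by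
      simp [List.all, h1, h2, h3]
    rw [if_pos hall]
    dsimp only
    rw [PySem.List.foldl_append_singleton_eq_self]
    simp only [split_cube_A, carve_B, List.map, List.append_nil, List.nil_append]
    congr 1
    split_ifs <;> simp
  all_goals
    -- some axis is empty: A's get_overlap returns none, B's all-test is false
    have hA : get_overlap_A [(a0, a1), (b0, b1), (c0, c1)] [(d0, d1), (e0, e1), (f0, f1)] =
        none := by
      simp only [get_overlap_A]
      split_ifs <;> first | rfl | omega
    have hall : ([((a0, a1), (d0, d1)), ((b0, b1), (e0, e1)), ((c0, c1), (f0, f1))]).all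
        (fun p => decide (max p.1.1 p.2.1 < min p.1.2 p.2.2)) = false := by
      simp only [List.all, Bool.and_eq_false_iff, decide_eq_false_iff_not]
      tauto
    rw [hA, hall]
    dsimp only
    rw [if_neg (by simp)]

lemma fold_eq (cube : List (Int × Int)) (hcube : cube.length = 3)
    (cuboids : List (List (Int × Int))) (h : ∀ c ∈ cuboids, c.length = 3)
    (acc : List (List (Int × Int))) :
    cuboids.foldl (fun new_cuboids cuboid =>
      match get_overlap_A cuboid cube with
      | some overlap => (split_cube_A cuboid overlap).foldl (fun nc s => nc ++ [s]) new_cuboids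
      | none => new_cuboids ++ [cuboid]) acc =
    cuboids.foldl (step_B cube) acc := by
  induction cuboids generalizing acc with
  | nil => rfl
  | cons hd tl ih =>
    simp only [List.foldl_cons]
    rw [step_eq cube hd hcube (h hd (List.mem_cons_self)) acc]
    exact ih (fun c hm => h c (List.mem_cons_of_mem _ hm)) _

-- ===== VERDICT (by name: the statement is the Claim_ definition above) =====
theorem remove_overlap_spec : Claim_equal_remove_overlap := by
  intro cuboids cube _ hpre
  unfold Spec_remove_overlap remove_overlap remove_overlap_alt
  rcases hpre with rfl | ⟨hcube, hall⟩
  · rfl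
  · exact fold_eq cube hcube cuboids hall []
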